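-- pv_equiv track=rewrite | github.com/LednevAlexandr/Pythonnnn | Sem3-4_13.py | function
-- ===== SOURCE A (Python) =====
-- def function(arg1,arg2):
--     count = 0
--     s=''
--     for i in range(len(arg2)):
--         for j in range(len(arg1)):
--             if arg1[j]==arg2[i] : s=s+arg2[j]
--         if s==arg1:
--             count=count+1
--             s=''
--     return count
-- ===== SOURCE B (Python) =====
-- def function(arg1, arg2):
--     # Precompute, per distinct character c of arg2, the string contributed by one
--     # outer-loop iteration of the original: arg2[j] for each j with arg1[j] == c.
--     contrib = {}
--     for c in arg2:
--         if c not in contrib: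
--             t = ''
--             for j, ch in enumerate(arg1):
--                 if ch == c:
--                     t = t + arg2[j]
--             contrib[c] = t
--     count = 0
--     s = ''
--     for c in arg2:
--         s = s + contrib[c]
--         if s == arg1:
--             count = count + 1
--             s = ''
--     return count
-- ===== Notes on version B (the rewrite author's own statement) =====
-- stated objective: faster
-- what changed: A rescans all of arg1 (and re-reads arg2) inside every outer iteration; B precomputes, once per distinct character of arg2, the string that character contributes, then runs a single accumulate-and-compare pass over arg2 with a dict lookup.
import Mathlib
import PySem

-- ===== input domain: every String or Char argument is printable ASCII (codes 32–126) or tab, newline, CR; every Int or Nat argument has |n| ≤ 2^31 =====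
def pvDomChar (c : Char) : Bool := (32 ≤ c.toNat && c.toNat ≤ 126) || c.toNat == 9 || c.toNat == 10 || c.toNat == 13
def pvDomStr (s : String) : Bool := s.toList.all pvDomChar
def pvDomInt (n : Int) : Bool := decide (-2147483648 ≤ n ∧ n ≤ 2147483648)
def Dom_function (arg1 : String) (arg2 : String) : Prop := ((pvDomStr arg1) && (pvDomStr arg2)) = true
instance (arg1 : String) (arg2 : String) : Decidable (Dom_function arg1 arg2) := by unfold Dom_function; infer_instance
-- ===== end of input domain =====

-- B replaces A's per-iteration rescan of arg1 by a contribution table (one string per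
-- distinct character of arg2) built once, then a single accumulate-and-compare pass.

-- ===== PORT A =====
-- body of A's inner j-loop: if arg1[j]==arg2[i]: s = s + arg2[j]  (none = IndexError on arg2[j])
def astep (l1 l2 : List Char) (c : Char) (acc : Option (List Char)) (j : Nat) : Option (List Char) :=
  acc.bind fun s => if l1.getD j ' ' = c then (l2[j]?).map (fun ch => s ++ [ch]) else some s

-- A's inner loop: for j in range(len(arg1)), starting from the current s
def innerA (l1 l2 : List Char) (c : Char) (s : List Char) : Option (List Char) :=
  (List.range l1.length).foldl (astep l1 l2 c) (some s)

def function (arg1 : String) (arg2 : String) : Int :=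
  let l1 := arg1.toList
  let l2 := arg2.toList
  match l2.foldl (fun st c => st.bind fun cs =>
      (innerA l1 l2 c cs.2).map fun s =>
        if s = l1 then (cs.1 + 1, ([] : List Char)) else (cs.1, s))
    (some ((0 : Int), ([] : List Char))) with
  | some cs => cs.1
  | none => 0  -- unreachable under Pre_function (Python raises IndexError)

-- ===== PORT B =====
-- body of B's table loop: for j, ch in enumerate(arg1): if ch == c: t = t + arg2[j]
def bstep (l2 : List Char) (c : Char) (acc : Option (List Char)) (p : Int × Char) : Option (List Char) :=
  acc.bind fun t => if p.2 = c then (PySem.List.pyGet? l2 p.1).map (fun ch2 => t ++ [ch2]) else some t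

def contribOf (l1 l2 : List Char) (c : Char) : Option (List Char) :=
  (PySem.List.enumerate l1).foldl (bstep l2 c) (some [])

-- B's first loop: contrib[c] for each not-yet-seen character c of arg2
def buildContrib (l1 l2 : List Char) : Option (PySem.Dict Char (List Char)) :=
  l2.foldl (fun acc c => acc.bind fun d =>
      if d.contains c then some d else (contribOf l1 l2 c).map fun t => d.insert c t)
    (some PySem.Dict.empty)

def function_alt (arg1 : String) (arg2 : String) : Int :=
  let l1 := arg1.toList
  let l2 := arg2.toList
  match buildContrib l1 l2 with
  | none => 0  -- unreachable under Pre_function (Python raises IndexError)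
  | some d =>
    (l2.foldl (fun (st : Int × List Char) c =>
        let s := st.2 ++ d.getD c []
        if s = l1 then (st.1 + 1, ([] : List Char)) else (st.1, s))
      ((0 : Int), ([] : List Char))).1

-- ===== PRECONDITION & SPEC =====
-- Pre_ excludes exactly the inputs on which Python A raises IndexError: a position j of arg1
-- whose character occurs in arg2 while j ≥ len(arg2) (the access arg2[j] then fails; B raises there too).
def Pre_function (arg1 : String) (arg2 : String) : Prop :=
  ∀ j ∈ List.range arg1.toList.length,
    arg1.toList.getD j ' ' ∈ arg2.toList → j < arg2.toList.length
instance (arg1 : String) (arg2 : String) : Decidable (Pre_function arg1 arg2) := by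
  unfold Pre_function; infer_instance

def pvWitness_function : String × String := ("ab", "ab")

def Spec_function (arg1 : String) (arg2 : String) (out : Int) : Prop := out = function_alt arg1 arg2
instance (arg1 : String) (arg2 : String) (out : Int) : Decidable (Spec_function arg1 arg2 out) := by
  unfold Spec_function; infer_instance

-- ===== CLAIM (what is proved, stated in full; the proofs are below) =====
def Claim_equal_function : Prop := ∀ (arg1 : String) (arg2 : String), Dom_function arg1 arg2 → Pre_function arg1 arg2 → Spec_function arg1 arg2 (function arg1 arg2)

-- ===== LEMMAS AND PROOFS =====

-- B's table entry for c is A's inner loop run from the empty accumulator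
lemma contribOf_eq_range (l1 l2 : List Char) (c : Char) :
    contribOf l1 l2 c = (List.range l1.length).foldl (astep l1 l2 c) (some []) := by
  unfold contribOf
  rw [PySem.List.enumerate_eq_map_pyRange l1 ' ', PySem.List.len_eq, PySem.List.pyRange_zero_natCast,
    List.foldl_map, List.foldl_map]
  simp only [bstep, PySem.List.pyGetD_natCast, PySem.List.pyGet?_natCast]
  rfl

lemma foldl_astep_none (l1 l2 : List Char) (c : Char) (js : List Nat) :
    js.foldl (astep l1 l2 c) none = none := by
  induction js with
  | nil => rfl
  | cons j js ih => simpa [astep] using ih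

-- the inner loop only appends: its result from s is its result from [] prefixed by s
lemma foldl_astep_some (l1 l2 : List Char) (c : Char) (js : List Nat) (s : List Char) :
    js.foldl (astep l1 l2 c) (some s)
      = (js.foldl (astep l1 l2 c) (some [])).map (fun t => s ++ t) := by
  induction js generalizing s with
  | nil => simp
  | cons j js ih =>
    simp only [List.foldl_cons, astep, Option.bind_some]
    by_cases h1 : l1.getD j ' ' = c
    · simp only [if_pos h1]
      cases h2 : l2[j]? with
      | none => simp only [Option.map_none, foldl_astep_none]
      | some ch =>
        simp only [Option.map_some]
        rw [ih (s ++ [ch]), ih ([] ++ [ch])]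
        cases List.foldl (astep l1 l2 c) (some []) js <;> simp
    · simp only [if_neg h1]; exact ih s

lemma innerA_eq (l1 l2 : List Char) (c : Char) (s : List Char) :
    innerA l1 l2 c s = (contribOf l1 l2 c).map (fun t => s ++ t) := by
  rw [innerA, contribOf_eq_range, foldl_astep_some]

lemma foldl_bd_none (l1 l2 : List Char) (m : List Char) :
    m.foldl (fun acc c => acc.bind fun d =>
      if d.contains c then some d else (contribOf l1 l2 c).map fun t => d.insert c t)
      (none : Option (PySem.Dict Char (List Char))) = none := by
  induction m with
  | nil => rfl
  | cons c m ih => simpa using ih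

-- invariant of B's build loop: every key the dict acquires is bound to its contribOf value
lemma build_inv (l1 l2 : List Char) (m : List Char) (d res : PySem.Dict Char (List Char))
    (H0 : ∀ x, d.contains x = true → d.get? x = contribOf l1 l2 x)
    (H : m.foldl (fun acc c => acc.bind fun d =>
      if d.contains c then some d else (contribOf l1 l2 c).map fun t => d.insert c t) (some d) = some res) :
    (∀ x, d.contains x = true → res.contains x = true) ∧
    (∀ x ∈ m, res.contains x = true) ∧
    (∀ x, res.contains x = true → res.get? x = contribOf l1 l2 x) := by
  induction m generalizing d with
  | nil =>
    simp only [List.foldl_nil, Option.some_inj] at H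
    subst H
    exact ⟨fun x hx => hx, by simp, H0⟩
  | cons c0 m ih =>
    simp only [List.foldl_cons, Option.bind_some] at H
    by_cases hc : d.contains c0
    · rw [if_pos hc] at H
      obtain ⟨h1, h2, h3⟩ := ih d H0 H
      refine ⟨h1, ?_, h3⟩
      intro x hx
      rcases List.mem_cons.mp hx with rfl | hx
      · exact h1 x hc
      · exact h2 x hx
    · rw [if_neg hc] at H
      cases ht : contribOf l1 l2 c0 with
      | none => rw [ht] at H; simp only [Option.map_none] at H; rw [foldl_bd_none] at H; cases H
      | some t =>
        rw [ht] at H; simp only [Option.map_some] at H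
        have H0' : ∀ x, (d.insert c0 t).contains x = true → (d.insert c0 t).get? x = contribOf l1 l2 x := by
          intro x hx
          by_cases hxc : x = c0
          · subst hxc; rw [PySem.Dict.get?_insert_self, ht]
          · rw [PySem.Dict.get?_insert_of_ne d t hxc]
            rw [PySem.Dict.contains_insert] at hx
            simp only [Bool.or_eq_true, beq_iff_eq] at hx
            rcases hx with rfl | hx
            · exact absurd rfl hxc
            · exact H0 x hx
        obtain ⟨h1, h2, h3⟩ := ih (d.insert c0 t) H0' H
        refine ⟨?_, ?_, h3⟩
        · intro x hx
          apply h1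
          rw [PySem.Dict.contains_insert]
          simp [hx]
        · intro x hx
          rcases List.mem_cons.mp hx with rfl | hx
          · apply h1; apply PySem.Dict.contains_insert_self
          · exact h2 x hx

-- under Pre_, every arg2[j] access the table build performs is in range
lemma contribOf_isSome (l1 l2 : List Char)
    (hPre : ∀ j ∈ List.range l1.length, l1.getD j ' ' ∈ l2 → j < l2.length)
    (c : Char) (hc : c ∈ l2) : (contribOf l1 l2 c).isSome := by
  rw [contribOf_eq_range]
  have key : ∀ (js : List Nat) (s : List Char), (∀ j ∈ js, l1.getD j ' ' = c → j < l2.length) →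
      (js.foldl (astep l1 l2 c) (some s)).isSome := by
    intro js
    induction js with
    | nil => intro s _; rfl
    | cons j js ih =>
      intro s hjs
      simp only [List.foldl_cons, astep, Option.bind_some]
      by_cases h1 : l1.getD j ' ' = c
      · rw [if_pos h1]
        have hj : j < l2.length := hjs j (List.mem_cons_self) h1
        rw [List.getElem?_eq_getElem hj]
        exact ih _ (fun j' hj' => hjs j' (List.mem_cons_of_mem _ hj'))
      · rw [if_neg h1]
        exact ih s (fun j' hj' => hjs j' (List.mem_cons_of_mem _ hj'))
  exact key _ [] (fun j hj heq => hPre j hj (heq ▸ hc))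

lemma build_some (l1 l2 : List Char)
    (hPre : ∀ j ∈ List.range l1.length, l1.getD j ' ' ∈ l2 → j < l2.length) :
    ∃ d, buildContrib l1 l2 = some d := by
  unfold buildContrib
  have key : ∀ (m : List Char), (∀ c ∈ m, (contribOf l1 l2 c).isSome) →
      ∀ d : PySem.Dict Char (List Char), ∃ res, m.foldl (fun acc c => acc.bind fun d =>
        if d.contains c then some d else (contribOf l1 l2 c).map fun t => d.insert c t) (some d) = some res := by
    intro m
    induction m with
    | nil => intro _ d; exact ⟨d, rfl⟩
    | cons c0 m ih =>
      intro hm d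
      simp only [List.foldl_cons, Option.bind_some]
      by_cases hc : d.contains c0
      · rw [if_pos hc]; exact ih (fun c hc' => hm c (List.mem_cons_of_mem _ hc')) d
      · rw [if_neg hc]
        cases ht : contribOf l1 l2 c0 with
        | none => exact absurd (ht ▸ hm c0 List.mem_cons_self) (by simp)
        | some t =>
          simp only [Option.map_some]
          exact ih (fun c hc' => hm c (List.mem_cons_of_mem _ hc')) (d.insert c0 t)
  exact key l2 (fun c hc => contribOf_isSome l1 l2 hPre c hc) PySem.Dict.empty

-- A's outer loop equals B's second pass, given the table is correct on the characters scanned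
lemma loop_eq (l1 l2 : List Char) (d : PySem.Dict Char (List Char)) (m : List Char)
    (Hm : ∀ c ∈ m, contribOf l1 l2 c = some (d.getD c []))
    (count : Int) (s : List Char) :
    m.foldl (fun st c => st.bind fun cs =>
        (innerA l1 l2 c cs.2).map fun s' =>
          if s' = l1 then (cs.1 + 1, ([] : List Char)) else (cs.1, s'))
      (some (count, s))
    = some (m.foldl (fun (st : Int × List Char) c =>
        let s' := st.2 ++ d.getD c []
        if s' = l1 then (st.1 + 1, ([] : List Char)) else (st.1, s')) (count, s)) := by
  induction m generalizing count s with
  | nil => rfl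
  | cons c m ih =>
    have hc := Hm c List.mem_cons_self
    simp only [List.foldl_cons, Option.bind_some]
    rw [innerA_eq, hc]
    simp only [Option.map_some]
    by_cases h : s ++ d.getD c [] = l1
    · rw [if_pos h]
      rw [ih (fun c' hc' => Hm c' (List.mem_cons_of_mem _ hc'))]
    · rw [if_neg h]
      rw [ih (fun c' hc' => Hm c' (List.mem_cons_of_mem _ hc'))]

lemma main_eq (arg1 arg2 : String) (hpre : Pre_function arg1 arg2) :
    function arg1 arg2 = function_alt arg1 arg2 := by
  unfold Pre_function at hpre
  obtain ⟨d, hd⟩ := build_some arg1.toList arg2.toList hpre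
  have hd' : arg2.toList.foldl (fun acc c => acc.bind fun d =>
      if d.contains c then some d
      else (contribOf arg1.toList arg2.toList c).map fun t => d.insert c t)
      (some PySem.Dict.empty) = some d := hd
  obtain ⟨h1, h2, h3⟩ := build_inv arg1.toList arg2.toList arg2.toList PySem.Dict.empty d
    (by intro x hx; rw [PySem.Dict.contains_empty] at hx; cases hx) hd'
  have Hm : ∀ c ∈ arg2.toList,
      contribOf arg1.toList arg2.toList c = some (d.getD c []) := by
    intro c hc
    have hg := h3 c (h2 c hc)
    have hs := contribOf_isSome arg1.toList arg2.toList hpre c hc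
    cases ht : contribOf arg1.toList arg2.toList c with
    | none => rw [ht] at hs; cases hs
    | some t => rw [PySem.Dict.getD_eq_get?_getD, hg, ht]; rfl
  have hl := loop_eq arg1.toList arg2.toList d arg2.toList Hm 0 []
  simp only [function, function_alt]
  rw [hd, hl]

-- ===== VERDICT (by name: the statement is the Claim_ definition above) =====
theorem function_spec : Claim_equal_function := by
  intro arg1 arg2 _ hpre
  unfold Spec_function
  exact main_eq arg1 arg2 hpre
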